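-- pv_equiv track=rewrite | github.com/buzzgeek/RepoBuzz | hashcode_2019/python/solve.py | genslides
-- ===== SOURCE A (Python) =====
-- def genslides(picdata, part):
--     slides = list()
--     horpics = None
--     verpics = None
--     if part == None: # use all pictures
--         horpics = [i for i,p in enumerate(picdata) if p[0] == "H"]
--         verpics = [i for i,p in enumerate(picdata) if p[0] == "V"]
--     else:
--         horpics = [i for i in part if picdata[i][0] == "H"]
--         verpics = [i for i in part if picdata[i][0] == "V"]
--
--     # adding most possible pictures as slides (ids)
--     for i in range(int(len(verpics)/2)):
--         slides.append([verpics[i*2], verpics[i*2+1]])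
--     for i in range(int(len(horpics))):
--         slides.append([horpics[i]])
--     return slides
-- ===== SOURCE B (Python) =====
-- def genslides(picdata, part):
--     hor_slides = []
--     ver_pairs = []
--     pending = None
--     if part == None:
--         src = [(i, p[0]) for i, p in enumerate(picdata)]
--     else:
--         src = [(i, picdata[i][0]) for i in part]
--     for i, o in src:
--         if o == "H":
--             hor_slides.append([i])
--         elif o == "V":
--             if pending is None:
--                 pending = i
--             else:
--                 ver_pairs.append([pending, i])
--                 pending = None
--     return ver_pairs + hor_slides
-- ===== Notes on version B (the rewrite author's own statement) =====
-- stated objective: alternative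
-- what changed: Replaces A's two filtering passes plus two index-arithmetic output loops with a single pass over (index, orientation) pairs that pairs verticals on the fly via a one-slot pending variable.
import Mathlib
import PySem

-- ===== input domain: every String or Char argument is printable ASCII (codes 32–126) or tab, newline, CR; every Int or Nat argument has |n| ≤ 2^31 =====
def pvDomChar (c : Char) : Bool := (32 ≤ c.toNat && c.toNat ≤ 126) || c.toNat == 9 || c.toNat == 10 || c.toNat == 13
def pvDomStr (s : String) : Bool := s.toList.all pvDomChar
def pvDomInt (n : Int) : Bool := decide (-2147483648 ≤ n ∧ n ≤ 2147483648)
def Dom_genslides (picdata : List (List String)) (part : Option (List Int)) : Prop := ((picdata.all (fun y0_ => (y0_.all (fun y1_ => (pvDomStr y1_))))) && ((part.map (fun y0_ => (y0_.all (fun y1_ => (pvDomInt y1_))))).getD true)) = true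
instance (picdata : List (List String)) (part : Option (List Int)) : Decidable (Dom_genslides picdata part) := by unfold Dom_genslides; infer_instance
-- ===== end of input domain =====

-- B replaces A's two filtering passes + two output loops with a single pass and a pending slot (alternative decomposition, same cost).
-- ===== PORT A =====
def genslides (picdata : List (List String)) (part : Option (List Int)) : List (List Int) :=
  let horpics : List Int :=
    match part with
    | none => ((PySem.List.enumerate picdata).filter
        (fun ip => (PySem.List.pyGet? ip.2 0).getD "" = "H")).map (fun ip => ip.1)
    | some l => l.filter (fun i =>
        (PySem.List.pyGet? ((PySem.List.pyGet? picdata i).getD []) 0).getD "" = "H")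
  let verpics : List Int :=
    match part with
    | none => ((PySem.List.enumerate picdata).filter
        (fun ip => (PySem.List.pyGet? ip.2 0).getD "" = "V")).map (fun ip => ip.1)
    | some l => l.filter (fun i =>
        (PySem.List.pyGet? ((PySem.List.pyGet? picdata i).getD []) 0).getD "" = "V")
  -- range(int(len(verpics)/2)) / range(len(horpics)): counts are nonnegative, ported as List.range (exact)
  let slides := (List.range (verpics.length / 2)).foldl
    (fun acc i => acc ++ [[verpics.getD (2 * i) 0, verpics.getD (2 * i + 1) 0]]) []
  (List.range horpics.length).foldl (fun acc i => acc ++ [[horpics.getD i 0]]) slides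

-- ===== PORT B =====
def genslidesLoop : List (Int × String) → List (List Int) → List (List Int) → Option Int → List (List Int)
  | [], verPairs, horSlides, _ => verPairs ++ horSlides
  | (i, o) :: rest, verPairs, horSlides, pending =>
    if o = "H" then genslidesLoop rest verPairs (horSlides ++ [[i]]) pending
    else if o = "V" then
      match pending with
      | none => genslidesLoop rest verPairs horSlides (some i)
      | some j => genslidesLoop rest (verPairs ++ [[j, i]]) horSlides none
    else genslidesLoop rest verPairs horSlides pending

def genslides_alt (picdata : List (List String)) (part : Option (List Int)) : List (List Int) :=
  let src : List (Int × String) :=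
    match part with
    | none => (PySem.List.enumerate picdata).map
        (fun ip => (ip.1, (PySem.List.pyGet? ip.2 0).getD ""))
    | some l => l.map (fun i =>
        (i, (PySem.List.pyGet? ((PySem.List.pyGet? picdata i).getD []) 0).getD ""))
  genslidesLoop src [] [] none

-- ===== PRECONDITION & SPEC =====
-- Pre_ excludes exactly the inputs where Python A raises: an index in part outside
-- Python range semantics (IndexError) or an indexed picture that is the empty list (p[0] IndexError).
def Pre_genslides (picdata : List (List String)) (part : Option (List Int)) : Prop :=
  (part = none → ∀ p ∈ picdata, p ≠ []) ∧
  (∀ i ∈ part.getD [], PySem.Raise.InRange picdata.length i ∧ (PySem.List.pyGet? picdata i).getD [] ≠ [])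

instance (picdata : List (List String)) (part : Option (List Int)) : Decidable (Pre_genslides picdata part) := by
  unfold Pre_genslides; infer_instance

def pvWitness_genslides : List (List String) × Option (List Int) :=
  ([["H"], ["V"], ["V"], ["X"]], none)

def Spec_genslides (picdata : List (List String)) (part : Option (List Int)) (out : List (List Int)) : Prop := out = genslides_alt picdata part
instance (picdata : List (List String)) (part : Option (List Int)) (out : List (List Int)) : Decidable (Spec_genslides picdata part out) := by unfold Spec_genslides; infer_instance

-- ===== CLAIM (what is proved, stated in full; the proofs are below) =====
def Claim_equal_genslides : Prop := ∀ (picdata : List (List String)) (part : Option (List Int)), Dom_genslides picdata part → Pre_genslides picdata part → Spec_genslides picdata part (genslides picdata part)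

-- ===== LEMMAS AND PROOFS =====

/-- chunk a list into consecutive pairs, dropping an odd trailing element. -/
def pairup : List Int → List (List Int)
  | [] => []
  | [_] => []
  | a :: b :: t => [a, b] :: pairup t

theorem hor_loop_eq (l : List Int) (acc : List (List Int)) :
    (List.range l.length).foldl (fun acc i => acc ++ [[l.getD i 0]]) acc
      = acc ++ l.map (fun x => [x]) := by
  induction l generalizing acc with
  | nil => simp
  | cons a t ih =>
    simp only [List.length_cons, List.range_succ_eq_map, List.foldl_cons, List.foldl_map]
    rw [show (fun (acc : List (List Int)) (i : Nat) => acc ++ [[(a :: t).getD (i + 1) 0]])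
          = (fun acc i => acc ++ [[t.getD i 0]]) by funext acc i; simp]
    rw [ih]; simp

theorem ver_loop_eq (v : List Int) (acc : List (List Int)) :
    (List.range (v.length / 2)).foldl
        (fun acc i => acc ++ [[v.getD (2 * i) 0, v.getD (2 * i + 1) 0]]) acc
      = acc ++ pairup v := by
  induction v using pairup.induct generalizing acc with
  | case3 a b t ih =>
    have hl : (a :: b :: t).length / 2 = t.length / 2 + 1 := by
      simp [List.length_cons]; omega
    rw [hl, List.range_succ_eq_map, List.foldl_cons, List.foldl_map]
    rw [show (fun (acc : List (List Int)) (i : Nat) =>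
          acc ++ [[(a :: b :: t).getD (2 * (i + 1)) 0, (a :: b :: t).getD (2 * (i + 1) + 1) 0]])
        = (fun acc i => acc ++ [[t.getD (2 * i) 0, t.getD (2 * i + 1) 0]]) by
      funext acc i
      have h1 : 2 * (i + 1) = 2 * i + 1 + 1 := by omega
      have h2 : 2 * (i + 1) + 1 = 2 * i + 1 + 1 + 1 := by omega
      simp [h1]]
    rw [ih]
    simp [pairup]
  | case1 => simp [pairup]
  | case2 _ => simp [pairup]

def optList : Option Int → List Int
  | none => []
  | some j => [j]

theorem genslidesLoop_eq (src : List (Int × String)) (verPairs horSlides : List (List Int))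
    (pending : Option Int) :
    genslidesLoop src verPairs horSlides pending
      = verPairs ++ pairup (optList pending ++ (src.filter (fun x => x.2 = "V")).map (·.1))
          ++ horSlides ++ ((src.filter (fun x => x.2 = "H")).map (·.1)).map (fun x => [x]) := by
  induction src generalizing verPairs horSlides pending with
  | nil =>
    cases pending <;> simp [genslidesLoop, optList, pairup]
  | cons hd tl ih =>
    obtain ⟨i, o⟩ := hd
    by_cases hH : o = "H"
    · simp only [genslidesLoop, hH, ih]
      simp
    · by_cases hV : o = "V"
      · cases pending with
        | none =>
          simp only [genslidesLoop, if_neg hH, hV, ih]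
          simp [hV, hH, optList]
        | some j =>
          simp only [genslidesLoop, if_neg hH, hV, ih]
          simp [hV, hH, optList, pairup]
      · simp only [genslidesLoop, if_neg hH, if_neg hV, ih]
        simp [hV, hH]

theorem filter_src {α : Type} (l : List α) (g : α → Int) (f : α → String) (s : String) :
    (((l.map (fun x => (g x, f x))).filter (fun x => x.2 = s)).map (·.1))
      = (l.filter (fun x => f x = s)).map g := by
  induction l with
  | nil => simp
  | cons a t ih => by_cases h : f a = s <;> simp [h, ih]

-- ===== VERDICT (by name: the statement is the Claim_ definition above) =====
theorem genslides_spec : Claim_equal_genslides := by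
  intro picdata part _ _
  unfold Spec_genslides genslides genslides_alt
  cases part with
  | none =>
    simp only [genslidesLoop_eq, ver_loop_eq, hor_loop_eq, optList, List.nil_append]
    rw [show (fun (ip : Int × List String) => (ip.1, (PySem.List.pyGet? ip.2 0).getD ""))
          = (fun ip : Int × List String => ((fun x : Int × List String => x.1) ip,
              (fun x : Int × List String => (PySem.List.pyGet? x.2 0).getD "") ip)) from rfl,
        filter_src, filter_src]
    simp
  | some l =>
    simp only [genslidesLoop_eq, ver_loop_eq, hor_loop_eq, optList, List.nil_append]
    simp [filter_src]
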